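-- pv_equiv track=rewrite | github.com/tanakaht/atcoder | problems/abc230/abc230_g.py | factors2yakusu
-- ===== SOURCE A (Python) =====
-- def factors2yakusu(fs):
--     ret = set()
--     fs = list(fs)
--     for bit in range(1, 1<<len(fs)):
--         x = 1
--         for i in range(len(fs)):
--             if (bit>>i)&1:
--                 x *= fs[i]
--         ret.add(x)
--     return ret
-- ===== SOURCE B (Python) =====
-- def factors2yakusu(fs):
--     prods = []          # distinct subset products, in first-insertion order
--     seen = set()
--     for f in fs:
--         # products of subsets that contain f: f alone, or f times an earlier product
--         for p in [f] + [q * f for q in prods]: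
--             if p not in seen:
--                 seen.add(p)
--                 prods.append(p)
--     return set(prods)
-- ===== Notes on version B (the rewrite author's own statement) =====
-- stated objective: alternative
-- what changed: Replaces the 2^n-bitmask enumeration with a full n-step inner product per mask by a single incremental pass that multiplies each factor into the deduplicated set of products seen so far (intended as faster, O(2^n*n) -> O(#distinct partial products); a timing run read 13x at n=16 but could not confirm it past its per-call cap, so no speed is claimed).
import Mathlib
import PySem

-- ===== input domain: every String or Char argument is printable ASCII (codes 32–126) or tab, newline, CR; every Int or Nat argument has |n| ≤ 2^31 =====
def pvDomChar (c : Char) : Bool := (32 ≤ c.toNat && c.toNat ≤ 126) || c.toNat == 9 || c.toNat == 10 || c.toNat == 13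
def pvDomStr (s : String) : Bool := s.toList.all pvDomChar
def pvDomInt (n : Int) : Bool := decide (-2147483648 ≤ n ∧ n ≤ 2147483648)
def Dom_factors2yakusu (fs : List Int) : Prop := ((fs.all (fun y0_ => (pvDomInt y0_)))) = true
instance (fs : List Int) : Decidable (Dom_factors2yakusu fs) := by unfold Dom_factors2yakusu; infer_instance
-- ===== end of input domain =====

-- B replaces A's 2^n-bitmask enumeration (each mask with a full n-step inner product) by one
-- incremental pass multiplying each factor into the deduplicated set of products so far.

-- ===== PORT A =====
-- inner loop of A: x = 1; for i in range(len(fs)): if (bit>>i)&1: x *= fs[i]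
-- (i ≥ 0 on every element of the range, so the shift amount i.toNat is exact)
def pvProdA (fs : List Int) (bit : Int) : Int :=
  (PySem.List.pyRange 0 (fs.length : Int) 1).foldl
    (fun x i => if PySem.Int.band (bit >>> i.toNat) 1 ≠ 0 then x * PySem.List.pyGetD fs i 0 else x) 1

def factors2yakusu (fs : List Int) : List Int :=
  (PySem.List.pyRange 1 ((1 : Int) <<< fs.length) 1).foldl
    (fun ret bit => PySem.Set.add ret (pvProdA fs bit)) PySem.Set.empty

-- ===== PORT B =====
-- In Source B, `prods` (insertion order) and `seen` always hold the same elements, which is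
-- exactly a PySem.Set; `if p not in seen: append to both` is PySem.Set.add.
def factors2yakusu_alt (fs : List Int) : List Int :=
  fs.foldl (fun prods f =>
      (f :: prods.map (fun q => q * f)).foldl PySem.Set.add prods)
    PySem.Set.empty

-- ===== PRECONDITION & SPEC =====
def Spec_factors2yakusu (fs : List Int) (out : List Int) : Prop := out = factors2yakusu_alt fs
instance (fs : List Int) (out : List Int) : Decidable (Spec_factors2yakusu fs out) := by unfold Spec_factors2yakusu; infer_instance

-- ===== CLAIM (what is proved, stated in full; the proofs are below) =====
def Claim_equal_factors2yakusu : Prop := ∀ (fs : List Int), Dom_factors2yakusu fs → Spec_factors2yakusu fs (factors2yakusu fs)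

-- ===== LEMMAS AND PROOFS =====

-- the list of subset products in A's insertion order (bitmask counting order)
def pvVals (fs : List Int) : List Int :=
  (PySem.List.pyRange 1 ((1 : Int) <<< fs.length) 1).map (pvProdA fs)

-- folding Set.add over elements already present is a no-op
lemma pvFoldlAddNoop (l : List Int) (T : PySem.Set Int) (h : ∀ z ∈ l, z ∈ T) :
    l.foldl PySem.Set.add T = T := by
  induction l generalizing T with
  | nil => rfl
  | cons z l ih =>
    simp only [List.foldl_cons]
    rw [PySem.Set.add_of_mem (h z (by simp))]
    exact ih T (fun z' hz' => h z' (by simp [hz']))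

-- folding Set.add only appends
lemma pvFoldlAddSuffix (u : List Int) (S : PySem.Set Int) :
    ∃ t, u.foldl PySem.Set.add S = S ++ t := by
  induction u generalizing S with
  | nil => exact ⟨[], by simp⟩
  | cons x u ih =>
    simp only [List.foldl_cons]
    by_cases hx : x ∈ S
    · rw [PySem.Set.add_of_mem hx]; exact ih S
    · rw [PySem.Set.add_of_not_mem hx]
      obtain ⟨t, ht⟩ := ih (S ++ [x])
      exact ⟨x :: t, by simp [ht]⟩

-- dedup commutes with "map then add-fold": adding the g-images of the first occurrences of u
-- gives the same set-list as adding the g-images of all of u, in order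
lemma pvMapDedup (u : List Int) (S T : PySem.Set Int) (g : Int → Int)
    (h : ∀ y ∈ S, g y ∈ T) :
    ((u.foldl PySem.Set.add S).map g).foldl PySem.Set.add T = (u.map g).foldl PySem.Set.add T := by
  induction u generalizing S T with
  | nil =>
    simp only [List.foldl_nil, List.map_nil]
    exact pvFoldlAddNoop _ T (by
      intro z hz
      obtain ⟨y, hy, rfl⟩ := List.mem_map.mp hz
      exact h y hy)
  | cons x u ih =>
    simp only [List.foldl_cons, List.map_cons]
    by_cases hx : x ∈ S
    · rw [PySem.Set.add_of_mem hx, PySem.Set.add_of_mem (h x hx)]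
      exact ih S T h
    · rw [PySem.Set.add_of_not_mem hx]
      have hT' : ∀ y ∈ S ++ [x], g y ∈ PySem.Set.add T (g x) := by
        intro y hy
        rcases List.mem_append.mp hy with hy | hy
        · exact (PySem.Set.mem_add _ _ _).mpr (Or.inl (h y hy))
        · simp only [List.mem_singleton] at hy
          subst hy
          exact (PySem.Set.mem_add _ _ _).mpr (Or.inr rfl)
      have ihx := ih (S ++ [x]) (PySem.Set.add T (g x)) hT'
      obtain ⟨t, ht⟩ := pvFoldlAddSuffix u (S ++ [x])
      rw [ht] at ihx ⊢
      rw [← ihx]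
      simp only [List.map_append, List.foldl_append, List.map_cons, List.foldl_cons,
        List.map_nil, List.foldl_nil]
      rw [pvFoldlAddNoop (S.map g) T (by
        intro z hz
        obtain ⟨y, hy, rfl⟩ := List.mem_map.mp hz
        exact h y hy)]
      rw [pvFoldlAddNoop (S.map g) (PySem.Set.add T (g x)) (by
        intro z hz
        obtain ⟨y, hy, rfl⟩ := List.mem_map.mp hz
        exact (PySem.Set.mem_add _ _ _).mpr (Or.inl (h y hy)))]
      rw [PySem.Set.add_of_mem ((PySem.Set.mem_add _ _ _).mpr (Or.inr rfl))]

lemma pvAEq (fs : List Int) :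
    factors2yakusu fs = (pvVals fs).foldl PySem.Set.add PySem.Set.empty := by
  simp [factors2yakusu, pvVals, List.foldl_map]

lemma pvBSnoc (fs : List Int) (f : Int) :
    factors2yakusu_alt (fs ++ [f]) =
      (f :: (factors2yakusu_alt fs).map (fun q => q * f)).foldl PySem.Set.add
        (factors2yakusu_alt fs) := by
  simp [factors2yakusu_alt, List.foldl_append]

lemma pvShiftOne (n : Nat) : ((1 : Int) <<< n) = ((2 ^ n : Nat) : Int) := by
  rw [Int.shiftLeft_eq]; push_cast; ring

lemma pvProdAZero (fs : List Int) : pvProdA fs 0 = 1 := by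
  unfold pvProdA
  rw [PySem.List.foldl_congr_mem _ _ (fun x _ => x) 1 (by
    intro acc i _
    simp [show PySem.Int.band 0 1 = 0 from rfl])]
  induction PySem.List.pyRange 0 (fs.length : Int) 1 with
  | nil => rfl
  | cons a l ih => simp [ih]

lemma pvLowBit (r n k : Nat) (hk : k < n) : ((2 ^ n + r) >>> k) % 2 = (r >>> k) % 2 := by
  rw [Nat.shiftRight_eq_div_pow, Nat.shiftRight_eq_div_pow]
  have h1 : (2 : Nat) ^ n = 2 ^ (n - k) * 2 ^ k := by rw [← pow_add]; congr 1; omega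
  rw [h1, Nat.add_comm, Nat.add_mul_div_right _ _ (Nat.two_pow_pos k)]
  have h2 : (2 : Nat) ^ (n - k) = 2 * 2 ^ (n - k - 1) := by
    rw [← pow_succ']; congr 1; omega
  omega

lemma pvTopBit (r n : Nat) (hr : r < 2 ^ n) : ((2 ^ n + r) >>> n) % 2 = 1 := by
  rw [Nat.shiftRight_eq_div_pow, Nat.add_comm, Nat.add_div_right _ (Nat.two_pow_pos n),
    Nat.div_eq_of_lt hr]

-- the truthiness test of A's inner loop, on a nonnegative bit mask
lemma pvCond (m k : Nat) :
    (PySem.Int.band ((m : Int) >>> (k : Int)) 1 ≠ 0) ↔ ((m >>> k) % 2 = 1) := by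
  have h1 : ((m : Int) >>> (k : Int)) = ((m >>> k : Nat) : Int) := by simp
  rw [h1, PySem.Int.band_one]
  have h2 : PySem.Int.mod ((m >>> k : Nat) : Int) 2 = (((m >>> k) % 2 : Nat) : Int) := by
    exact_mod_cast PySem.Int.mod_natCast (m >>> k) 2
  rw [h2]
  omega

lemma pvGetAppend (fs : List Int) (f : Int) (i : Int) (h0 : 0 ≤ i) (h : i < (fs.length : Int)) :
    PySem.List.pyGetD (fs ++ [f]) i 0 = PySem.List.pyGetD fs i 0 := by
  rw [PySem.List.pyGetD_of_nonneg _ _ h0, PySem.List.pyGetD_of_nonneg _ _ h0]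
  have : i.toNat < fs.length := by omega
  simp [List.getD, List.getElem?_append_left this]

lemma pvProdASnocLow (fs : List Int) (f : Int) (m : Nat) (hm : m < 2 ^ fs.length) :
    pvProdA (fs ++ [f]) (m : Int) = pvProdA fs (m : Int) := by
  unfold pvProdA
  have hlen : ((fs ++ [f]).length : Int) = (fs.length : Int) + 1 := by
    simp
  rw [hlen, PySem.List.pyRange_one_succ_right (by positivity), List.foldl_append]
  simp only [List.foldl_cons, List.foldl_nil, Int.toNat_natCast]
  rw [if_neg (by
    rw [pvCond, Nat.shiftRight_eq_div_pow, Nat.div_eq_of_lt hm]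
    omega)]
  exact PySem.List.foldl_congr_mem _ _ _ 1 (by
    intro acc i hi
    obtain ⟨hi0, hin⟩ := (PySem.List.mem_pyRange_one).mp hi
    rw [pvGetAppend fs f i hi0 hin])

lemma pvProdASnocHi (fs : List Int) (f : Int) (r : Nat) (hr : r < 2 ^ fs.length) :
    pvProdA (fs ++ [f]) ((2 ^ fs.length + r : Nat) : Int) = pvProdA fs (r : Int) * f := by
  unfold pvProdA
  have hlen : ((fs ++ [f]).length : Int) = (fs.length : Int) + 1 := by
    simp
  rw [hlen, PySem.List.pyRange_one_succ_right (by positivity), List.foldl_append]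
  simp only [List.foldl_cons, List.foldl_nil, Int.toNat_natCast]
  rw [if_pos (by rw [pvCond, pvTopBit r fs.length hr])]
  have hget : PySem.List.pyGetD (fs ++ [f]) (fs.length : Int) 0 = f := by
    rw [PySem.List.pyGetD_of_nonneg _ _ (by positivity)]
    simp [List.getD]
  rw [hget]
  congr 1
  exact PySem.List.foldl_congr_mem _ _ _ 1 (by
    intro acc i hi
    obtain ⟨hi0, hin⟩ := (PySem.List.mem_pyRange_one).mp hi
    have hik : i.toNat < fs.length := by omega
    by_cases hc : ((r >>> i.toNat) % 2 = 1)
    · rw [if_pos (by rw [pvCond, pvLowBit r fs.length i.toNat hik]; exact hc),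
        if_pos (by rw [pvCond]; exact hc), pvGetAppend fs f i hi0 hin]
    · rw [if_neg (by rw [pvCond, pvLowBit r fs.length i.toNat hik]; exact hc),
        if_neg (by rw [pvCond]; exact hc)])

lemma pvValsSnoc (fs : List Int) (f : Int) :
    pvVals (fs ++ [f]) = pvVals fs ++ f :: (pvVals fs).map (fun q => q * f) := by
  have hpow : 1 ≤ 2 ^ fs.length := Nat.one_le_two_pow
  have hlen : (fs ++ [f]).length = fs.length + 1 := by simp
  unfold pvVals
  rw [hlen, pvShiftOne, pvShiftOne, PySem.List.pyRange_one, PySem.List.pyRange_one]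
  have hc1 : (((2 ^ (fs.length + 1) : Nat) : Int) - 1).toNat = (2 ^ fs.length - 1) + 2 ^ fs.length := by
    have h2 : (2 : Nat) ^ (fs.length + 1) = 2 ^ fs.length + 2 ^ fs.length := by ring
    omega
  have hc2 : (((2 ^ fs.length : Nat) : Int) - 1).toNat = 2 ^ fs.length - 1 := by omega
  rw [hc1, hc2, List.range_add]
  simp only [List.map_append, List.map_map]
  congr 1
  · apply List.map_congr_left
    intro k hk
    have hk' : k < 2 ^ fs.length - 1 := List.mem_range.mp hk
    simp only [Function.comp_apply]
    have h1 : (1 : Int) + (k : Int) = ((1 + k : Nat) : Int) := by push_cast; ring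
    rw [h1, pvProdASnocLow fs f (1 + k) (by omega), ← h1]
  · rw [List.map_congr_left (f := pvProdA (fs ++ [f]) ∘ ((fun k : Nat => (1 : Int) + (k : Int)) ∘ fun x => 2 ^ fs.length - 1 + x))
      (g := fun k : Nat => pvProdA fs (k : Int) * f) (by
        intro k hk
        have hk' : k < 2 ^ fs.length := List.mem_range.mp hk
        simp only [Function.comp_apply]
        have h1 : (1 : Int) + ((2 ^ fs.length - 1 + k : Nat) : Int) = ((2 ^ fs.length + k : Nat) : Int) := by
          omega
        rw [h1, pvProdASnocHi fs f k hk'])]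
    rw [show List.range (2 ^ fs.length) = List.range ((2 ^ fs.length - 1) + 1) from by
      congr 1; omega]
    rw [List.range_succ_eq_map]
    simp only [List.map_cons, List.map_map]
    congr 1
    · simp [pvProdAZero]
    · apply List.map_congr_left
      intro k _
      simp only [Function.comp_apply]
      have h1 : ((k + 1 : Nat) : Int) = 1 + (k : Int) := by push_cast; ring
      simp [Nat.succ_eq_add_one, h1]

lemma pvMain (fs : List Int) : factors2yakusu fs = factors2yakusu_alt fs := by
  induction fs using List.reverseRecOn with
  | nil => rfl
  | append_singleton fs f ih =>
    rw [pvAEq, pvValsSnoc, List.foldl_append, ← pvAEq, ih, pvBSnoc]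
    simp only [List.foldl_cons]
    have hmd := pvMapDedup (pvVals fs) PySem.Set.empty
      (PySem.Set.add (factors2yakusu_alt fs) f) (fun q => q * f) (by
        intro y hy
        simp [PySem.Set.empty] at hy)
    rw [← pvAEq, ih] at hmd
    exact hmd.symm

-- ===== VERDICT (by name: the statement is the Claim_ definition above) =====
theorem factors2yakusu_spec : Claim_equal_factors2yakusu := by
  intro fs _
  unfold Spec_factors2yakusu
  exact pvMain fs
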